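-- pv_equiv track=rewrite | github.com/sTaiyo/bookbot | main.py | get_num_of_each_char
-- ===== SOURCE A (Python) =====
-- def get_num_of_each_char(text):
--     char_nums = {}
--     lowercased_text = text.lower()
--     for char in lowercased_text:
--         if char.isalpha():
--             if not char in char_nums:
--                 char_nums[char] = 0
--             char_nums[char]  += 1
--     return dict(sorted(char_nums.items()))
-- ===== SOURCE B (Python) =====
-- def get_num_of_each_char(text):
--     chars = sorted(c for c in text.lower() if c.isalpha())
--     result = {}
--     while chars:
--         c = chars[0]
--         run = 1
--         while run < len(chars) and chars[run] == c:
--             run += 1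
--         result[c] = run
--         chars = chars[run:]
--     return result
-- ===== Notes on version B (the rewrite author's own statement) =====
-- stated objective: alternative
-- what changed: B replaces A's one-pass dict accumulation followed by a final sort of the items with a sort-then-group pipeline: it sorts the alphabetic characters of the lowercased text (with duplicates) and then run-length-scans the sorted list, emitting each distinct character with its run length, so the result is built already in key order and no counting dict or post-sort is needed.
import Mathlib
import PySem

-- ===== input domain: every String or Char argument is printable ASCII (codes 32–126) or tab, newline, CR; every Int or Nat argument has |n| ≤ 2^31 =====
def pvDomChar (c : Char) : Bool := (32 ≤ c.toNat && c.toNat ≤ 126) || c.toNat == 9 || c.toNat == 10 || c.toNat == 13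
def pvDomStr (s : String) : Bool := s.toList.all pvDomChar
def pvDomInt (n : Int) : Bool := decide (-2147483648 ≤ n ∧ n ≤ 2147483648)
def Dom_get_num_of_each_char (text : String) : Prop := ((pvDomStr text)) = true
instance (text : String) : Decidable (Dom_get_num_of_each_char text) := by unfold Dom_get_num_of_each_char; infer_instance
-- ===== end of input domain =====

-- B sorts the alphabetic characters of the lowercased text (with duplicates) and then
-- run-length-scans the sorted list, instead of A's dict accumulation plus a final item
-- sort (objective: alternative).

-- ===== PORT A =====
def get_num_of_each_char (text : String) : List (String × Int) :=
  let lowercased_text := PySem.Str.lower text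
  let char_nums : PySem.Dict String Int :=
    lowercased_text.toList.foldl (fun char_nums char =>
      if PySem.Chars.isalpha char then
        let key := String.ofList [char]
        let char_nums := if !char_nums.contains key then char_nums.insert key 0 else char_nums
        -- 'char_nums[key] += 1': the key is present at this point, so this stores
        -- exactly (current value) + 1
        char_nums.insert key (char_nums.getD key 0 + 1)
      else char_nums) PySem.Dict.empty
  -- dict(sorted(char_nums.items())): keys are distinct, so the returned dict IS the sorted pair list
  PySem.List.sorted2 char_nums.items (fun p => p.1) (fun p => p.2) false

-- ===== PORT B =====
-- Source B's outer while loop: take the first remaining (sorted) character, measure its run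
-- (the inner scan of equal neighbours is the takeWhile), record it, drop the run.
def pvRunLoop : List Char → PySem.Dict String Int → PySem.Dict String Int
  | [], result => result
  | c :: rest, result =>
      let run := 1 + (rest.takeWhile (fun x => x == c)).length
      pvRunLoop ((c :: rest).drop run) (result.insert (String.ofList [c]) (run : Int))
  termination_by chars _ => chars.length
  decreasing_by simp [List.length_drop]

def get_num_of_each_char_alt (text : String) : List (String × Int) :=
  let chars := PySem.List.sorted ((PySem.Str.lower text).toList.filter PySem.Chars.isalpha)
    (fun c => c) false
  (pvRunLoop chars PySem.Dict.empty).items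

-- ===== PRECONDITION & SPEC =====
def Spec_get_num_of_each_char (text : String) (out : List (String × Int)) : Prop := out = get_num_of_each_char_alt text
instance (text : String) (out : List (String × Int)) : Decidable (Spec_get_num_of_each_char text out) := by unfold Spec_get_num_of_each_char; infer_instance

-- ===== CLAIM (what is proved, stated in full; the proofs are below) =====
def Claim_equal_get_num_of_each_char : Prop := ∀ (text : String), Dom_get_num_of_each_char text → Spec_get_num_of_each_char text (get_num_of_each_char text)

-- ===== LEMMAS AND PROOFS =====

-- A's loop body: once the 'if not in' line has ensured the key is present, the whole
-- body is one insert of (old value + 1).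
lemma stepA_eq :
    (fun (d : PySem.Dict String Int) (key : String) =>
      (if !d.contains key then d.insert key 0 else d).insert key
        ((if !d.contains key then d.insert key 0 else d).getD key 0 + 1))
    = fun (d : PySem.Dict String Int) (key : String) => d.insert key (d.getD key 0 + 1) := by
  funext d key
  by_cases h : d.contains key
  · simp [h]
  · simp only [Bool.not_eq_true] at h
    simp [h, PySem.Dict.getD_insert_self, PySem.Dict.insert_insert_self,
      PySem.Dict.getD_of_not_contains _ _ h]

-- a conditional loop over L is the plain loop over the filtered-and-mapped list
lemma foldl_if_map {α β γ : Type} (L : List α) (p : α → Bool) (f : α → β)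
    (g : γ → β → γ) (init : γ) :
    L.foldl (fun acc a => if p a then g acc (f a) else acc) init
      = ((L.filter p).map f).foldl g init := by
  rw [List.foldl_map, List.foldl_filter]

-- String.ofList [·] is injective and strictly monotone
lemma mkStr_injective : Function.Injective (fun c : Char => String.ofList [c]) := by
  intro a b h
  have h2 := congrArg String.toList h
  simp only [String.toList_ofList, List.cons.injEq, and_true] at h2
  exact h2

lemma mkStr_lt {a b : Char} (h : a < b) : String.ofList [a] < String.ofList [b] := by
  rw [String.lt_iff_toList_lt, String.toList_ofList, String.toList_ofList]
  exact List.Lex.rel h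

-- set(l.map f) = (set l).map f for injective f
lemma set_add_map {α β : Type} [BEq α] [LawfulBEq α] [BEq β] [LawfulBEq β]
    (f : α → β) (hf : Function.Injective f) (s : List α) (x : α) :
    PySem.Set.add (s.map f) (f x) = (PySem.Set.add s x).map f := by
  by_cases hx : x ∈ s
  · simp [PySem.Set.add, hx, List.mem_map_of_mem]
  · have hfx : ¬ f x ∈ s.map f := by
      intro hm
      rcases List.mem_map.mp hm with ⟨y, hy, hxy⟩
      exact hx ((hf hxy) ▸ hy)
    simp [PySem.Set.add, hx, hfx]

lemma foldl_add_map {α β : Type} [BEq α] [LawfulBEq α] [BEq β] [LawfulBEq β]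
    (f : α → β) (hf : Function.Injective f) :
    ∀ (l : List α) (s : List α),
      ((l.map f).foldl PySem.Set.add (s.map f)) = (l.foldl PySem.Set.add s).map f := by
  intro l
  induction l with
  | nil => intro s; rfl
  | cons x xs ih =>
      intro s
      simp only [List.map_cons, List.foldl_cons, set_add_map f hf s x]
      exact ih (PySem.Set.add s x)

lemma ofList_map {α β : Type} [BEq α] [LawfulBEq α] [BEq β] [LawfulBEq β]
    (f : α → β) (hf : Function.Injective f) (l : List α) :
    PySem.Set.ofList (l.map f) = (PySem.Set.ofList l).map f := by
  rw [PySem.Set.ofList_eq_foldl, PySem.Set.ofList_eq_foldl]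
  have := foldl_add_map f hf l []
  simpa using this

-- insertBy with two relations that agree against the accumulator
lemma insertBy_congr {α : Type} (b1 b2 : α → α → Bool) (x : α) (acc : List α)
    (h : ∀ y ∈ acc, b1 x y = b2 x y) :
    PySem.List.insertBy b1 x acc = PySem.List.insertBy b2 x acc := by
  induction acc with
  | nil => rfl
  | cons y ys ih =>
      show (if b1 x y then x :: y :: ys else y :: PySem.List.insertBy b1 x ys)
        = (if b2 x y then x :: y :: ys else y :: PySem.List.insertBy b2 x ys)
      rw [h y (by simp), ih (fun z hz => h z (by simp [hz]))]

lemma foldl_insertBy_congr {α : Type} (S : List α) (b1 b2 : α → α → Bool)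
    (hb : ∀ a ∈ S, ∀ b ∈ S, b1 a b = b2 a b) :
    ∀ (xs acc : List α), (∀ a ∈ xs, a ∈ S) → (∀ y ∈ acc, y ∈ S) →
    xs.foldl (fun acc x => PySem.List.insertBy b1 x acc) acc
      = xs.foldl (fun acc x => PySem.List.insertBy b2 x acc) acc := by
  intro xs
  induction xs with
  | nil => intro acc _ _; rfl
  | cons x xs ih =>
      intro acc hxs hacc
      have hx : x ∈ S := hxs x (by simp)
      have h1 : PySem.List.insertBy b1 x acc = PySem.List.insertBy b2 x acc :=
        insertBy_congr b1 b2 x acc (fun y hy => hb x hx y (hacc y hy))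
      simp only [List.foldl_cons, h1]
      exact ih (PySem.List.insertBy b2 x acc)
        (fun a ha => hxs a (by simp [ha]))
        (fun y hy => by
          rcases (PySem.List.mem_insertBy b2 x y acc).mp hy with h | h
          · exact h ▸ hx
          · exact hacc y h)

-- a tuple sort whose first key is injective on the list is the plain sort by the first key
lemma sorted2_eq_sorted {α κ₁ κ₂ : Type} [LinearOrder κ₁] [LinearOrder κ₂]
    (xs : List α) (k1 : α → κ₁) (k2 : α → κ₂)
    (h : ∀ a ∈ xs, ∀ b ∈ xs, k1 a = k1 b → a = b) :
    PySem.List.sorted2 xs k1 k2 false = PySem.List.sorted xs k1 false := by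
  rw [PySem.List.sorted_eq_foldl_insertBy]
  show xs.foldl (fun acc x => PySem.List.insertBy
      (fun a b => decide (k1 a < k1 b) || (!decide (k1 b < k1 a) && decide (k2 a < k2 b))) x acc) []
    = _
  apply foldl_insertBy_congr xs _ _ _ xs [] (fun a ha => ha) (by simp)
  intro a ha b hb
  by_cases hlt : k1 a < k1 b
  · simp [hlt]
  · by_cases heq : k1 a = k1 b
    · have : a = b := h a ha b hb heq
      subst this
      simp
    · have hgt : k1 b < k1 a := lt_of_le_of_ne (le_of_not_gt hlt) (Ne.symm heq)
      simp [hlt, hgt]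

-- ---- B-side: run-length structure of the sorted list ----

-- the distinct keys the outer loop visits, in order
def pvRunKeys : List Char → List Char
  | [] => []
  | c :: rest => c :: pvRunKeys (rest.dropWhile (fun x => x == c))
  termination_by chars => chars.length
  decreasing_by
    have := (List.dropWhile_sublist (l := rest) (p := fun x => x == c)).length_le
    simp; omega

lemma pvRunKeys_subset : ∀ (S : List Char), ∀ x ∈ pvRunKeys S, x ∈ S := by
  intro S
  induction S using pvRunKeys.induct with
  | case1 => intro x hx; simp [pvRunKeys] at hx
  | case2 c rest ih =>
      intro x hx
      rw [pvRunKeys] at hx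
      rcases List.mem_cons.mp hx with rfl | hx
      · exact List.mem_cons_self
      · exact List.mem_cons_of_mem c ((List.dropWhile_sublist _).mem (ih x hx))

lemma mem_takeWhile_eq {c : Char} {rest : List Char} :
    ∀ x ∈ rest.takeWhile (fun x => x == c), x = c := by
  intro x hx
  have h := List.mem_takeWhile_imp (l := rest) (p := fun x => x == c) hx
  exact eq_of_beq h

lemma gt_of_mem_dropWhile {c : Char} :
    ∀ (rest : List Char), (∀ y ∈ rest, c ≤ y) → rest.Pairwise (· ≤ ·) →
      ∀ x ∈ rest.dropWhile (fun x => x == c), c < x := by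
  intro rest
  induction rest with
  | nil => intro _ _ x hx; cases hx
  | cons y ys ih =>
      intro hle hpw x hx
      rcases List.pairwise_cons.mp hpw with ⟨hy, hys⟩
      rw [List.dropWhile_cons] at hx
      by_cases hyc : (y == c) = true
      · rw [if_pos hyc] at hx
        exact ih (fun z hz => hle z (List.mem_cons_of_mem y hz)) hys x hx
      · rw [if_neg hyc] at hx
        have hcy : c < y := lt_of_le_of_ne (hle y List.mem_cons_self)
          (fun h => hyc (by simp [h.symm]))
        rcases List.mem_cons.mp hx with rfl | hx
        · exact hcy
        · exact lt_of_lt_of_le hcy (hy x hx)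

lemma count_head {c : Char} {rest : List Char}
    (hle : ∀ y ∈ rest, c ≤ y) (hpw : rest.Pairwise (· ≤ ·)) :
    rest.count c = (rest.takeWhile (fun x => x == c)).length := by
  conv_lhs => rw [← List.takeWhile_append_dropWhile (p := fun x => x == c) (l := rest)]
  rw [List.count_append]
  have h1 : (rest.takeWhile (fun x => x == c)).count c
      = (rest.takeWhile (fun x => x == c)).length :=
    List.count_eq_length.mpr (fun b hb => (mem_takeWhile_eq b hb).symm)
  have h2 : (rest.dropWhile (fun x => x == c)).count c = 0 :=
    List.count_eq_zero.mpr (fun h => lt_irrefl c (gt_of_mem_dropWhile rest hle hpw c h))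
  omega

lemma count_other {c e : Char} {rest : List Char} (hec : e ≠ c) :
    rest.count e = (rest.dropWhile (fun x => x == c)).count e := by
  conv_lhs => rw [← List.takeWhile_append_dropWhile (p := fun x => x == c) (l := rest)]
  rw [List.count_append]
  have h1 : (rest.takeWhile (fun x => x == c)).count e = 0 :=
    List.count_eq_zero.mpr (fun h => hec (mem_takeWhile_eq e h))
  omega

lemma drop_takeWhile_length {α : Type} (p : α → Bool) :
    ∀ (l : List α), l.drop (l.takeWhile p).length = l.dropWhile p := by
  intro l
  induction l with
  | nil => rfl
  | cons a l ih =>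
      by_cases h : p a = true
      · simpa [h] using ih
      · simp [h]

lemma mem_pvRunKeys : ∀ (S : List Char), S.Pairwise (· ≤ ·) → ∀ x ∈ S, x ∈ pvRunKeys S := by
  intro S
  induction S using pvRunKeys.induct with
  | case1 => intro _ x hx; cases hx
  | case2 c rest ih =>
      intro hpw x hx
      rcases List.pairwise_cons.mp hpw with ⟨hle, hrest⟩
      rw [pvRunKeys]
      by_cases hxc : x = c
      · exact hxc ▸ List.mem_cons_self
      · rcases List.mem_cons.mp hx with rfl | hx
        · exact absurd rfl hxc
        · apply List.mem_cons_of_mem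
          apply ih (hrest.sublist (List.dropWhile_sublist _))
          -- x sits in rest but is not c, so it survives the dropWhile
          have : x ∈ rest.takeWhile (fun x => x == c) ∨ x ∈ rest.dropWhile (fun x => x == c) := by
            rw [← List.mem_append, List.takeWhile_append_dropWhile]
            exact hx
          rcases this with h | h
          · exact absurd (mem_takeWhile_eq x h) hxc
          · exact h

lemma pvRunKeys_pairwise_lt : ∀ (S : List Char), S.Pairwise (· ≤ ·) →
    (pvRunKeys S).Pairwise (· < ·) := by
  intro S
  induction S using pvRunKeys.induct with
  | case1 => intro _; rw [pvRunKeys]; exact List.Pairwise.nil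
  | case2 c rest ih =>
      intro hpw
      rcases List.pairwise_cons.mp hpw with ⟨hle, hrest⟩
      rw [pvRunKeys]
      refine List.pairwise_cons.mpr ⟨?_, ih (hrest.sublist (List.dropWhile_sublist _))⟩
      intro x hx
      exact gt_of_mem_dropWhile rest hle hrest x
        (pvRunKeys_subset _ x hx)

-- the outer loop, run on a sorted list with keys fresh in the accumulator, appends
-- one (character, run length) pair per distinct character
lemma pvRunLoop_items : ∀ (n : Nat) (S : List Char), S.length ≤ n → S.Pairwise (· ≤ ·) →
    ∀ (d : PySem.Dict String Int),
      (∀ x ∈ S, d.contains (String.ofList [x]) = false) →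
      (pvRunLoop S d).items
        = d.items ++ (pvRunKeys S).map (fun c => (String.ofList [c], (S.count c : Int))) := by
  intro n
  induction n with
  | zero =>
      intro S hlen _ d _
      interval_cases h : S.length
      rw [List.length_eq_zero_iff.mp h]
      simp [pvRunLoop, pvRunKeys]
  | succ n ih =>
      intro S hlen hpw d hfresh
      match S with
      | [] => simp [pvRunLoop, pvRunKeys]
      | c :: rest =>
        rcases List.pairwise_cons.mp hpw with ⟨hle, hrest⟩
        rw [pvRunLoop, pvRunKeys]
        have hdrop : (c :: rest).drop (1 + (rest.takeWhile (fun x => x == c)).length)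
            = rest.dropWhile (fun x => x == c) := by
          rw [Nat.add_comm, List.drop_succ_cons, drop_takeWhile_length]
        have hgt := gt_of_mem_dropWhile rest hle hrest
        have hlen' : (rest.dropWhile (fun x => x == c)).length ≤ n := by
          have h1 := (List.dropWhile_sublist (l := rest) (p := fun x => x == c)).length_le
          have h2 : (c :: rest).length = rest.length + 1 := rfl
          omega
        have hfresh' : ∀ x ∈ rest.dropWhile (fun x => x == c),
            (d.insert (String.ofList [c])
              ((1 + (rest.takeWhile (fun x => x == c)).length : Nat) : Int)).contains
              (String.ofList [x]) = false := by
          intro x hx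
          rw [PySem.Dict.contains_insert]
          have hxc : x ≠ c := ne_of_gt (hgt x hx)
          have h1 : (String.ofList [x] == String.ofList [c]) = false := by
            simp only [beq_eq_false_iff_ne]
            intro h; exact hxc (mkStr_injective h)
          have h2 : d.contains (String.ofList [x]) = false :=
            hfresh x (List.mem_cons_of_mem c ((List.dropWhile_sublist _).mem hx))
          rw [h1, h2]
          rfl
        rw [hdrop]
        rw [ih (rest.dropWhile (fun x => x == c)) hlen'
          (hrest.sublist (List.dropWhile_sublist _)) _ hfresh']
        rw [PySem.Dict.items_insert_of_not_contains _ _ (hfresh c List.mem_cons_self)]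
        rw [List.append_assoc]
        congr 1
        rw [List.map_cons]
        have hhead : (String.ofList [c],
              ((1 + (rest.takeWhile (fun x => x == c)).length : Nat) : Int))
            = (String.ofList [c], (((c :: rest).count c : Nat) : Int)) := by
          have h1 := count_head hle hrest
          have h2 : (c :: rest).count c = rest.count c + 1 := by simp
          have h3 : 1 + (rest.takeWhile (fun x => x == c)).length = (c :: rest).count c := by
            omega
          rw [h3]
        have htail : (pvRunKeys (rest.dropWhile (fun x => x == c))).map
              (fun e => (String.ofList [e], ((rest.dropWhile (fun x => x == c)).count e : Int)))
            = (pvRunKeys (rest.dropWhile (fun x => x == c))).map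
              (fun e => (String.ofList [e], ((c :: rest).count e : Int))) := by
          apply List.map_congr_left
          intro e he
          have hec : e ≠ c := ne_of_gt (hgt e (pvRunKeys_subset _ e he))
          rw [← count_other hec, List.count_cons_of_ne hec.symm]
        rw [List.singleton_append, hhead, htail]

-- two strictly sorted lists over the same elements coincide; used to identify
-- B's visit order with sorted(set(F))
lemma pvRunKeys_eq_sortedSet (F : List Char) :
    pvRunKeys (PySem.List.sorted F (fun c => c) false)
      = PySem.List.sorted (PySem.Set.ofList F) (fun c => c) false := by
  set S := PySem.List.sorted F (fun c => c) false with hS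
  have hpw : S.Pairwise (· ≤ ·) := PySem.List.sorted_pairwise F (fun c => c)
  have hmemS : ∀ x, x ∈ S ↔ x ∈ F := fun x => by rw [hS]; exact PySem.List.mem_sorted F (fun c => c) false x
  have hnd : (pvRunKeys S).Nodup :=
    (pvRunKeys_pairwise_lt S hpw).imp (fun h => ne_of_lt h)
  have hmem : ∀ x, x ∈ pvRunKeys S ↔ x ∈ PySem.Set.ofList F := by
    intro x
    rw [PySem.Set.mem_ofList]
    constructor
    · intro h; exact (hmemS x).mp (pvRunKeys_subset S x h)
    · intro h; exact mem_pvRunKeys S hpw x ((hmemS x).mpr h)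
  have hperm : (pvRunKeys S).Perm (PySem.Set.ofList F) :=
    (List.perm_ext_iff_of_nodup hnd (PySem.Set.nodup_ofList F)).mpr hmem
  exact (PySem.List.sorted_eq_of_perm_of_pairwise_lt _ _ _ hperm
    (pvRunKeys_pairwise_lt S hpw)).symm

-- ===== VERDICT (by name: the statement is the Claim_ definition above) =====
theorem get_num_of_each_char_spec : Claim_equal_get_num_of_each_char := by
  intro text _
  show get_num_of_each_char text = get_num_of_each_char_alt text
  unfold get_num_of_each_char get_num_of_each_char_alt
  set L := (PySem.Str.lower text).toList with hLdef
  set F := L.filter PySem.Chars.isalpha with hFdef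
  set S := PySem.List.sorted F (fun c => c) false with hSdef
  -- A's dict is the counter of the filtered single-character strings
  have hdict :
      L.foldl (fun char_nums char =>
        if PySem.Chars.isalpha char then
          (if !char_nums.contains (String.ofList [char]) then char_nums.insert (String.ofList [char]) 0 else char_nums).insert
            (String.ofList [char])
            ((if !char_nums.contains (String.ofList [char]) then char_nums.insert (String.ofList [char]) 0 else char_nums).getD
              (String.ofList [char]) 0 + 1)
        else char_nums) (PySem.Dict.empty : PySem.Dict String Int)
      = PySem.Dict.counter (F.map (fun c => String.ofList [c])) := by
    calc L.foldl (fun char_nums char =>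
          if PySem.Chars.isalpha char then
            (if !char_nums.contains (String.ofList [char]) then char_nums.insert (String.ofList [char]) 0 else char_nums).insert
              (String.ofList [char])
              ((if !char_nums.contains (String.ofList [char]) then char_nums.insert (String.ofList [char]) 0 else char_nums).getD
                (String.ofList [char]) 0 + 1)
          else char_nums) (PySem.Dict.empty : PySem.Dict String Int)
        = (F.map (fun c => String.ofList [c])).foldl
            (fun d key =>
              (if !d.contains key then d.insert key 0 else d).insert key
                ((if !d.contains key then d.insert key 0 else d).getD key 0 + 1)) (PySem.Dict.empty : PySem.Dict String Int) :=
          foldl_if_map L PySem.Chars.isalpha (fun c => String.ofList [c])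
            (fun d key =>
              (if !d.contains key then d.insert key 0 else d).insert key
                ((if !d.contains key then d.insert key 0 else d).getD key 0 + 1))
            (PySem.Dict.empty : PySem.Dict String Int)
      _ = (F.map (fun c => String.ofList [c])).foldl
            (fun d key => d.insert key (d.getD key 0 + 1)) (PySem.Dict.empty : PySem.Dict String Int) := by rw [stepA_eq]
      _ = PySem.Dict.counter (F.map (fun c => String.ofList [c])) :=
          PySem.Dict.foldl_insert_getD_add_one_eq_counter _
  have hitems : (PySem.Dict.counter (F.map (fun c => String.ofList [c]))).items
      = (PySem.Set.ofList F).map (fun c => (String.ofList [c], (PySem.List.count F c : Int))) := by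
    rw [PySem.Dict.items_counter, ofList_map (fun c => String.ofList [c]) mkStr_injective, List.map_map]
    apply List.map_congr_left
    intro c _
    simp only [Function.comp, PySem.List.count_eq]
    rw [List.count_map_of_injective F (fun c => String.ofList [c]) mkStr_injective c]
  have hkeyinj : ∀ a ∈ (PySem.Set.ofList F).map (fun c => (String.ofList [c], (PySem.List.count F c : Int))),
      ∀ b ∈ (PySem.Set.ofList F).map (fun c => (String.ofList [c], (PySem.List.count F c : Int))),
      a.1 = b.1 → a = b := by
    intro a ha b hb hab
    rcases List.mem_map.mp ha with ⟨c, _, rfl⟩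
    rcases List.mem_map.mp hb with ⟨c', _, rfl⟩
    have hcc : c = c' := mkStr_injective hab
    rw [hcc]
  have hperm : ((PySem.List.sorted (PySem.Set.ofList F) (fun c => c) false).map
        (fun c => (String.ofList [c], (PySem.List.count F c : Int)))).Perm
      ((PySem.Set.ofList F).map (fun c => (String.ofList [c], (PySem.List.count F c : Int)))) :=
    (PySem.List.sorted_perm (PySem.Set.ofList F) (fun c => c) false).map _
  have hpw : ((PySem.List.sorted (PySem.Set.ofList F) (fun c => c) false).map
        (fun c => (String.ofList [c], (PySem.List.count F c : Int)))).Pairwise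
      (fun a b => a.1 < b.1) :=
    (PySem.List.sorted_ofList_pairwise_lt F).map _ (fun a b hab => mkStr_lt hab)
  -- B's side: the run-length scan of S yields the same sorted pair list
  have hB : (pvRunLoop S PySem.Dict.empty).items
      = (PySem.List.sorted (PySem.Set.ofList F) (fun c => c) false).map
          (fun c => (String.ofList [c], (PySem.List.count F c : Int))) := by
    rw [pvRunLoop_items S.length S (le_refl _)
      (PySem.List.sorted_pairwise F (fun c => c)) PySem.Dict.empty
      (fun x _ => PySem.Dict.contains_empty _)]
    rw [pvRunKeys_eq_sortedSet F]
    rw [show (PySem.Dict.empty : PySem.Dict String Int).items = [] from rfl, List.nil_append]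
    apply List.map_congr_left
    intro c _
    have : S.count c = F.count c := (PySem.List.sorted_perm F (fun c => c) false).count_eq c
    rw [PySem.List.count_eq, ← this]
  calc PySem.List.sorted2 _ (fun p => p.1) (fun p => p.2) false
      = PySem.List.sorted2
          ((PySem.Set.ofList F).map (fun c => (String.ofList [c], (PySem.List.count F c : Int))))
          (fun p => p.1) (fun p => p.2) false := by rw [hdict, hitems]
    _ = PySem.List.sorted
          ((PySem.Set.ofList F).map (fun c => (String.ofList [c], (PySem.List.count F c : Int))))
          (fun p => p.1) false := sorted2_eq_sorted _ _ _ hkeyinj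
    _ = (PySem.List.sorted (PySem.Set.ofList F) (fun c => c) false).map
          (fun c => (String.ofList [c], (PySem.List.count F c : Int))) :=
        PySem.List.sorted_eq_of_perm_of_pairwise_lt _ _ _ hperm hpw
    _ = (pvRunLoop S PySem.Dict.empty).items := hB.symm
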